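-- pv_equiv track=rewrite | github.com/andrwmillr/biographer | narrative_phase_b.py | era_of
-- ===== SOURCE A (Python) =====
-- ERAS = [
--     ("Amherst I",          "0000-00", "2013-05"),
--     ("Junior year",        "2013-06", "2014-08"),
--     ("Senior year",        "2014-09", "2015-05"),
--     ("Chicago",            "2015-06", "2017-05"),
--     ("LA/Amherst/Boston",  "2017-06", "2018-12"),
--     ("Boston",             "2019-01", "2020-08"),
--     ("New York I",         "2020-09", "2024-10"),
--     ("New York II",        "2024-11", "9999-99"),
-- ]
--
-- def era_of(date):
--     if not date or len(date) < 7: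
--         return None
--     ym = date[:7]
--     for name, lo, hi in ERAS:
--         if lo <= ym <= hi:
--             return name
--     return None
-- ===== SOURCE B (Python) =====
-- ERAS = [
--     ("Amherst I",          "0000-00", "2013-05"),
--     ("Junior year",        "2013-06", "2014-08"),
--     ("Senior year",        "2014-09", "2015-05"),
--     ("Chicago",            "2015-06", "2017-05"),
--     ("LA/Amherst/Boston",  "2017-06", "2018-12"),
--     ("Boston",             "2019-01", "2020-08"),
--     ("New York I",         "2020-09", "2024-10"),
--     ("New York II",        "2024-11", "9999-99"),
-- ]
--
-- _NAMES = [name for name, _, _ in ERAS]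
-- _LOS = [lo for _, lo, _ in ERAS]     # ascending
-- _HIS = [hi for _, _, hi in ERAS]
--
--
-- def era_of(date):
--     if date is None or len(date) < 7:
--         return None
--     ym = date[:7]
--     # hand-written bisect_right over the sorted lower bounds:
--     # lo = index of the first lower bound strictly greater than ym
--     lo, hi = 0, len(_LOS)
--     while lo < hi:
--         mid = (lo + hi) // 2
--         if _LOS[mid] <= ym:
--             lo = mid + 1
--         else:
--             hi = mid
--     # the only candidate interval is the one just before lo, if any
--     if lo > 0 and ym <= _HIS[lo - 1]:
--         return _NAMES[lo - 1]
--     return None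
-- ===== Notes on version B (the rewrite author's own statement) =====
-- stated objective: alternative
-- what changed: Replaces the linear scan over the ERAS triples with a hand-written bisect_right binary search over the precomputed sorted lower bounds followed by a single upper-bound check.
import Mathlib
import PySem

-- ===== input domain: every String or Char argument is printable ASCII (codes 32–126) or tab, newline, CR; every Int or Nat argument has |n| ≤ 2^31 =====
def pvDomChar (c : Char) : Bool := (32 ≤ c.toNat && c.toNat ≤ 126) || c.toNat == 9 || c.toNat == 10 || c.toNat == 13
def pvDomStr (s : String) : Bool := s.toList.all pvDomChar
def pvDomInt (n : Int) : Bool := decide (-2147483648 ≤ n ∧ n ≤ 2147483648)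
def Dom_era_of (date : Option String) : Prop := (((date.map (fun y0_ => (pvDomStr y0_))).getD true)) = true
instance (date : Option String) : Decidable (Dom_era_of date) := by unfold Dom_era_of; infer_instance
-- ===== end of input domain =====

-- B replaces A's linear scan of ERAS with a binary search (bisect_right) over the
-- precomputed sorted lower bounds, then a single upper-bound check (objective: alternative).
-- Python string comparison is code-point lexicographic = Lean's order on List Char
-- (PYSEM.md: str comparison), so both ports compare month strings as List Char.

-- ===== PORT A =====
def pvERAS : List (String × String × String) :=
  [("Amherst I",          "0000-00", "2013-05"),
   ("Junior year",        "2013-06", "2014-08"),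
   ("Senior year",        "2014-09", "2015-05"),
   ("Chicago",            "2015-06", "2017-05"),
   ("LA/Amherst/Boston",  "2017-06", "2018-12"),
   ("Boston",             "2019-01", "2020-08"),
   ("New York I",         "2020-09", "2024-10"),
   ("New York II",        "2024-11", "9999-99")]

-- the `for name, lo, hi in ERAS` loop with early return, as structural recursion
def eraScan (ym : List Char) : List (String × String × String) → Option String
  | [] => none
  | (n, lo, hi) :: rest =>
    if lo.toList ≤ ym ∧ ym ≤ hi.toList then some n else eraScan ym rest

def era_of (date : Option String) : Option String :=
  match date with
  | none => none                                       -- `not date` (None)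
  | some s =>
    -- `not date or len(date) < 7`; date[:7] = take 7 (PySem.List.slice_to_natCast)
    if s.toList = [] ∨ s.toList.length < 7 then none
    else eraScan (s.toList.take 7) pvERAS

-- ===== PORT B =====
-- the three comprehensions over ERAS
def pvNAMES : List String := pvERAS.map (fun e => e.1)
def pvLOS : List (List Char) := pvERAS.map (fun e => e.2.1.toList)
def pvHIS : List (List Char) := pvERAS.map (fun e => e.2.2.toList)

-- Source B's hand-written while loop is verbatim bisect.bisect_right, which the PySem
-- prelude owns as PySem.List.bisectRight (same lo/hi/mid loop); the result is used
-- through altCore so era_of_alt shares it with the lemmas below.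
def altCore (ym : List Char) : Option String :=
  let lo := PySem.List.bisectRight pvLOS ym
  -- `if lo > 0 and ym <= _HIS[lo-1]: return _NAMES[lo-1]`; index lo-1 < 8 is in range
  if 0 < lo ∧ ym ≤ pvHIS.getD (lo - 1) [] then some (pvNAMES.getD (lo - 1) "") else none

def era_of_alt (date : Option String) : Option String :=
  match date with
  | none => none                                       -- `date is None`
  | some s =>
    if s.toList.length < 7 then none                   -- `len(date) < 7`
    else altCore (s.toList.take 7)

-- ===== PRECONDITION & SPEC =====
def Spec_era_of (date : Option String) (out : Option String) : Prop := out = era_of_alt date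
instance (date : Option String) (out : Option String) : Decidable (Spec_era_of date out) := by unfold Spec_era_of; infer_instance

-- ===== CLAIM (what is proved, stated in full; the proofs are below) =====
def Claim_equal_era_of : Prop := ∀ (date : Option String), Dom_era_of date → Spec_era_of date (era_of date)

-- ===== LEMMAS AND PROOFS =====

-- the heart of the proof: on any 7-character key the linear scan and the
-- binary-search lookup agree; case analysis on the slab of lower bounds containing ym
theorem eraCore_eq (ym : List Char) : eraScan ym pvERAS = altCore ym := by
  by_cases hp0 : ym < (['0', '0', '0', '0', '-', '0', '0'] : List Char)
  · 
    have hlt0 : ym < (['0', '0', '0', '0', '-', '0', '0'] : List Char) := lt_of_lt_of_le hp0 (by decide)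
    have hnle0 : ¬ (['0', '0', '0', '0', '-', '0', '0'] : List Char) ≤ ym := not_le.mpr hlt0
    have hlt1 : ym < (['2', '0', '1', '3', '-', '0', '6'] : List Char) := lt_of_lt_of_le hp0 (by decide)
    have hnle1 : ¬ (['2', '0', '1', '3', '-', '0', '6'] : List Char) ≤ ym := not_le.mpr hlt1
    have hlt2 : ym < (['2', '0', '1', '4', '-', '0', '9'] : List Char) := lt_of_lt_of_le hp0 (by decide)
    have hnle2 : ¬ (['2', '0', '1', '4', '-', '0', '9'] : List Char) ≤ ym := not_le.mpr hlt2
    have hlt3 : ym < (['2', '0', '1', '5', '-', '0', '6'] : List Char) := lt_of_lt_of_le hp0 (by decide)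
    have hnle3 : ¬ (['2', '0', '1', '5', '-', '0', '6'] : List Char) ≤ ym := not_le.mpr hlt3
    have hlt4 : ym < (['2', '0', '1', '7', '-', '0', '6'] : List Char) := lt_of_lt_of_le hp0 (by decide)
    have hnle4 : ¬ (['2', '0', '1', '7', '-', '0', '6'] : List Char) ≤ ym := not_le.mpr hlt4
    have hlt5 : ym < (['2', '0', '1', '9', '-', '0', '1'] : List Char) := lt_of_lt_of_le hp0 (by decide)
    have hnle5 : ¬ (['2', '0', '1', '9', '-', '0', '1'] : List Char) ≤ ym := not_le.mpr hlt5
    have hlt6 : ym < (['2', '0', '2', '0', '-', '0', '9'] : List Char) := lt_of_lt_of_le hp0 (by decide)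
    have hnle6 : ¬ (['2', '0', '2', '0', '-', '0', '9'] : List Char) ≤ ym := not_le.mpr hlt6
    have hlt7 : ym < (['2', '0', '2', '4', '-', '1', '1'] : List Char) := lt_of_lt_of_le hp0 (by decide)
    have hnle7 : ¬ (['2', '0', '2', '4', '-', '1', '1'] : List Char) ≤ ym := not_le.mpr hlt7
    simp [eraScan, altCore, pvERAS, pvLOS, pvHIS, PySem.List.bisectRight, PySem.List.bisectRightLoop, hlt0, hnle0, hlt1, hnle1, hlt2, hnle2, hnle3, hlt4, hnle4, hnle5, hnle6, hnle7]
  · 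
    by_cases hp1 : ym < (['2', '0', '1', '3', '-', '0', '6'] : List Char)
    · 
      have hle0 : (['0', '0', '0', '0', '-', '0', '0'] : List Char) ≤ ym := le_trans (by decide) (not_lt.mp hp0)
      have hnlt0 : ¬ ym < (['0', '0', '0', '0', '-', '0', '0'] : List Char) := not_lt.mpr hle0
      have hlt1 : ym < (['2', '0', '1', '3', '-', '0', '6'] : List Char) := lt_of_lt_of_le hp1 (by decide)
      have hnle1 : ¬ (['2', '0', '1', '3', '-', '0', '6'] : List Char) ≤ ym := not_le.mpr hlt1
      have hlt2 : ym < (['2', '0', '1', '4', '-', '0', '9'] : List Char) := lt_of_lt_of_le hp1 (by decide)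
      have hnle2 : ¬ (['2', '0', '1', '4', '-', '0', '9'] : List Char) ≤ ym := not_le.mpr hlt2
      have hlt3 : ym < (['2', '0', '1', '5', '-', '0', '6'] : List Char) := lt_of_lt_of_le hp1 (by decide)
      have hnle3 : ¬ (['2', '0', '1', '5', '-', '0', '6'] : List Char) ≤ ym := not_le.mpr hlt3
      have hlt4 : ym < (['2', '0', '1', '7', '-', '0', '6'] : List Char) := lt_of_lt_of_le hp1 (by decide)
      have hnle4 : ¬ (['2', '0', '1', '7', '-', '0', '6'] : List Char) ≤ ym := not_le.mpr hlt4
      have hlt5 : ym < (['2', '0', '1', '9', '-', '0', '1'] : List Char) := lt_of_lt_of_le hp1 (by decide)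
      have hnle5 : ¬ (['2', '0', '1', '9', '-', '0', '1'] : List Char) ≤ ym := not_le.mpr hlt5
      have hlt6 : ym < (['2', '0', '2', '0', '-', '0', '9'] : List Char) := lt_of_lt_of_le hp1 (by decide)
      have hnle6 : ¬ (['2', '0', '2', '0', '-', '0', '9'] : List Char) ≤ ym := not_le.mpr hlt6
      have hlt7 : ym < (['2', '0', '2', '4', '-', '1', '1'] : List Char) := lt_of_lt_of_le hp1 (by decide)
      have hnle7 : ¬ (['2', '0', '2', '4', '-', '1', '1'] : List Char) ≤ ym := not_le.mpr hlt7
      simp [eraScan, altCore, pvERAS, pvNAMES, pvLOS, pvHIS, PySem.List.bisectRight, PySem.List.bisectRightLoop, hle0, hnlt0, hlt1, hnle1, hlt2, hnle2, hnle3, hlt4, hnle4, hnle5, hnle6, hnle7]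
    · 
      by_cases hp2 : ym < (['2', '0', '1', '4', '-', '0', '9'] : List Char)
      · 
        have hle0 : (['0', '0', '0', '0', '-', '0', '0'] : List Char) ≤ ym := le_trans (by decide) (not_lt.mp hp1)
        have hle1 : (['2', '0', '1', '3', '-', '0', '6'] : List Char) ≤ ym := le_trans (by decide) (not_lt.mp hp1)
        have hnlt1 : ¬ ym < (['2', '0', '1', '3', '-', '0', '6'] : List Char) := not_lt.mpr hle1
        have hlt2 : ym < (['2', '0', '1', '4', '-', '0', '9'] : List Char) := lt_of_lt_of_le hp2 (by decide)
        have hnle2 : ¬ (['2', '0', '1', '4', '-', '0', '9'] : List Char) ≤ ym := not_le.mpr hlt2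
        have hlt3 : ym < (['2', '0', '1', '5', '-', '0', '6'] : List Char) := lt_of_lt_of_le hp2 (by decide)
        have hnle3 : ¬ (['2', '0', '1', '5', '-', '0', '6'] : List Char) ≤ ym := not_le.mpr hlt3
        have hlt4 : ym < (['2', '0', '1', '7', '-', '0', '6'] : List Char) := lt_of_lt_of_le hp2 (by decide)
        have hnle4 : ¬ (['2', '0', '1', '7', '-', '0', '6'] : List Char) ≤ ym := not_le.mpr hlt4
        have hlt5 : ym < (['2', '0', '1', '9', '-', '0', '1'] : List Char) := lt_of_lt_of_le hp2 (by decide)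
        have hnle5 : ¬ (['2', '0', '1', '9', '-', '0', '1'] : List Char) ≤ ym := not_le.mpr hlt5
        have hlt6 : ym < (['2', '0', '2', '0', '-', '0', '9'] : List Char) := lt_of_lt_of_le hp2 (by decide)
        have hnle6 : ¬ (['2', '0', '2', '0', '-', '0', '9'] : List Char) ≤ ym := not_le.mpr hlt6
        have hlt7 : ym < (['2', '0', '2', '4', '-', '1', '1'] : List Char) := lt_of_lt_of_le hp2 (by decide)
        have hnle7 : ¬ (['2', '0', '2', '4', '-', '1', '1'] : List Char) ≤ ym := not_le.mpr hlt7
        have hna0 : ¬ ym ≤ (['2', '0', '1', '3', '-', '0', '5'] : List Char) := not_le.mpr (lt_of_lt_of_le (by decide) (not_lt.mp hp1))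
        simp [eraScan, altCore, pvERAS, pvNAMES, pvLOS, pvHIS, PySem.List.bisectRight, PySem.List.bisectRightLoop, hle0, hle1, hnlt1, hlt2, hnle2, hnle3, hlt4, hnle4, hnle5, hnle6, hnle7, hna0]
      · 
        by_cases hp3 : ym < (['2', '0', '1', '5', '-', '0', '6'] : List Char)
        · 
          have hle0 : (['0', '0', '0', '0', '-', '0', '0'] : List Char) ≤ ym := le_trans (by decide) (not_lt.mp hp2)
          have hle1 : (['2', '0', '1', '3', '-', '0', '6'] : List Char) ≤ ym := le_trans (by decide) (not_lt.mp hp2)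
          have hle2 : (['2', '0', '1', '4', '-', '0', '9'] : List Char) ≤ ym := le_trans (by decide) (not_lt.mp hp2)
          have hnlt2 : ¬ ym < (['2', '0', '1', '4', '-', '0', '9'] : List Char) := not_lt.mpr hle2
          have hlt3 : ym < (['2', '0', '1', '5', '-', '0', '6'] : List Char) := lt_of_lt_of_le hp3 (by decide)
          have hnle3 : ¬ (['2', '0', '1', '5', '-', '0', '6'] : List Char) ≤ ym := not_le.mpr hlt3
          have hlt4 : ym < (['2', '0', '1', '7', '-', '0', '6'] : List Char) := lt_of_lt_of_le hp3 (by decide)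
          have hnle4 : ¬ (['2', '0', '1', '7', '-', '0', '6'] : List Char) ≤ ym := not_le.mpr hlt4
          have hlt5 : ym < (['2', '0', '1', '9', '-', '0', '1'] : List Char) := lt_of_lt_of_le hp3 (by decide)
          have hnle5 : ¬ (['2', '0', '1', '9', '-', '0', '1'] : List Char) ≤ ym := not_le.mpr hlt5
          have hlt6 : ym < (['2', '0', '2', '0', '-', '0', '9'] : List Char) := lt_of_lt_of_le hp3 (by decide)
          have hnle6 : ¬ (['2', '0', '2', '0', '-', '0', '9'] : List Char) ≤ ym := not_le.mpr hlt6
          have hlt7 : ym < (['2', '0', '2', '4', '-', '1', '1'] : List Char) := lt_of_lt_of_le hp3 (by decide)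
          have hnle7 : ¬ (['2', '0', '2', '4', '-', '1', '1'] : List Char) ≤ ym := not_le.mpr hlt7
          have hna0 : ¬ ym ≤ (['2', '0', '1', '3', '-', '0', '5'] : List Char) := not_le.mpr (lt_of_lt_of_le (by decide) (not_lt.mp hp2))
          have hna1 : ¬ ym ≤ (['2', '0', '1', '4', '-', '0', '8'] : List Char) := not_le.mpr (lt_of_lt_of_le (by decide) (not_lt.mp hp2))
          simp [eraScan, altCore, pvERAS, pvNAMES, pvLOS, pvHIS, PySem.List.bisectRight, PySem.List.bisectRightLoop, hle0, hle1, hle2, hnlt2, hlt3, hnle3, hlt4, hnle4, hnle5, hnle6, hnle7, hna0, hna1]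
        · 
          by_cases hp4 : ym < (['2', '0', '1', '7', '-', '0', '6'] : List Char)
          · 
            have hle0 : (['0', '0', '0', '0', '-', '0', '0'] : List Char) ≤ ym := le_trans (by decide) (not_lt.mp hp3)
            have hle1 : (['2', '0', '1', '3', '-', '0', '6'] : List Char) ≤ ym := le_trans (by decide) (not_lt.mp hp3)
            have hle2 : (['2', '0', '1', '4', '-', '0', '9'] : List Char) ≤ ym := le_trans (by decide) (not_lt.mp hp3)
            have hnlt2 : ¬ ym < (['2', '0', '1', '4', '-', '0', '9'] : List Char) := not_lt.mpr hle2
            have hle3 : (['2', '0', '1', '5', '-', '0', '6'] : List Char) ≤ ym := le_trans (by decide) (not_lt.mp hp3)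
            have hnlt3 : ¬ ym < (['2', '0', '1', '5', '-', '0', '6'] : List Char) := not_lt.mpr hle3
            have hlt4 : ym < (['2', '0', '1', '7', '-', '0', '6'] : List Char) := lt_of_lt_of_le hp4 (by decide)
            have hnle4 : ¬ (['2', '0', '1', '7', '-', '0', '6'] : List Char) ≤ ym := not_le.mpr hlt4
            have hlt5 : ym < (['2', '0', '1', '9', '-', '0', '1'] : List Char) := lt_of_lt_of_le hp4 (by decide)
            have hnle5 : ¬ (['2', '0', '1', '9', '-', '0', '1'] : List Char) ≤ ym := not_le.mpr hlt5
            have hlt6 : ym < (['2', '0', '2', '0', '-', '0', '9'] : List Char) := lt_of_lt_of_le hp4 (by decide)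
            have hnle6 : ¬ (['2', '0', '2', '0', '-', '0', '9'] : List Char) ≤ ym := not_le.mpr hlt6
            have hlt7 : ym < (['2', '0', '2', '4', '-', '1', '1'] : List Char) := lt_of_lt_of_le hp4 (by decide)
            have hnle7 : ¬ (['2', '0', '2', '4', '-', '1', '1'] : List Char) ≤ ym := not_le.mpr hlt7
            have hna0 : ¬ ym ≤ (['2', '0', '1', '3', '-', '0', '5'] : List Char) := not_le.mpr (lt_of_lt_of_le (by decide) (not_lt.mp hp3))
            have hna1 : ¬ ym ≤ (['2', '0', '1', '4', '-', '0', '8'] : List Char) := not_le.mpr (lt_of_lt_of_le (by decide) (not_lt.mp hp3))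
            have hna2 : ¬ ym ≤ (['2', '0', '1', '5', '-', '0', '5'] : List Char) := not_le.mpr (lt_of_lt_of_le (by decide) (not_lt.mp hp3))
            simp [eraScan, altCore, pvERAS, pvNAMES, pvLOS, pvHIS, PySem.List.bisectRight, PySem.List.bisectRightLoop, hle0, hle1, hle2, hnlt2, hle3, hnlt3, hlt4, hnle4, hnle5, hnle6, hnle7, hna0, hna1, hna2]
          · 
            by_cases hp5 : ym < (['2', '0', '1', '9', '-', '0', '1'] : List Char)
            · 
              have hle0 : (['0', '0', '0', '0', '-', '0', '0'] : List Char) ≤ ym := le_trans (by decide) (not_lt.mp hp4)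
              have hle1 : (['2', '0', '1', '3', '-', '0', '6'] : List Char) ≤ ym := le_trans (by decide) (not_lt.mp hp4)
              have hle2 : (['2', '0', '1', '4', '-', '0', '9'] : List Char) ≤ ym := le_trans (by decide) (not_lt.mp hp4)
              have hle3 : (['2', '0', '1', '5', '-', '0', '6'] : List Char) ≤ ym := le_trans (by decide) (not_lt.mp hp4)
              have hle4 : (['2', '0', '1', '7', '-', '0', '6'] : List Char) ≤ ym := le_trans (by decide) (not_lt.mp hp4)
              have hnlt4 : ¬ ym < (['2', '0', '1', '7', '-', '0', '6'] : List Char) := not_lt.mpr hle4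
              have hlt5 : ym < (['2', '0', '1', '9', '-', '0', '1'] : List Char) := lt_of_lt_of_le hp5 (by decide)
              have hnle5 : ¬ (['2', '0', '1', '9', '-', '0', '1'] : List Char) ≤ ym := not_le.mpr hlt5
              have hlt6 : ym < (['2', '0', '2', '0', '-', '0', '9'] : List Char) := lt_of_lt_of_le hp5 (by decide)
              have hnle6 : ¬ (['2', '0', '2', '0', '-', '0', '9'] : List Char) ≤ ym := not_le.mpr hlt6
              have hlt7 : ym < (['2', '0', '2', '4', '-', '1', '1'] : List Char) := lt_of_lt_of_le hp5 (by decide)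
              have hnle7 : ¬ (['2', '0', '2', '4', '-', '1', '1'] : List Char) ≤ ym := not_le.mpr hlt7
              have hna0 : ¬ ym ≤ (['2', '0', '1', '3', '-', '0', '5'] : List Char) := not_le.mpr (lt_of_lt_of_le (by decide) (not_lt.mp hp4))
              have hna1 : ¬ ym ≤ (['2', '0', '1', '4', '-', '0', '8'] : List Char) := not_le.mpr (lt_of_lt_of_le (by decide) (not_lt.mp hp4))
              have hna2 : ¬ ym ≤ (['2', '0', '1', '5', '-', '0', '5'] : List Char) := not_le.mpr (lt_of_lt_of_le (by decide) (not_lt.mp hp4))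
              have hna3 : ¬ ym ≤ (['2', '0', '1', '7', '-', '0', '5'] : List Char) := not_le.mpr (lt_of_lt_of_le (by decide) (not_lt.mp hp4))
              simp [eraScan, altCore, pvERAS, pvNAMES, pvLOS, pvHIS, PySem.List.bisectRight, PySem.List.bisectRightLoop, hle0, hle1, hle2, hle3, hle4, hnlt4, hlt5, hnle5, hlt6, hnle6, hnle7, hna0, hna1, hna2, hna3]
            · 
              by_cases hp6 : ym < (['2', '0', '2', '0', '-', '0', '9'] : List Char)
              · 
                have hle0 : (['0', '0', '0', '0', '-', '0', '0'] : List Char) ≤ ym := le_trans (by decide) (not_lt.mp hp5)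
                have hle1 : (['2', '0', '1', '3', '-', '0', '6'] : List Char) ≤ ym := le_trans (by decide) (not_lt.mp hp5)
                have hle2 : (['2', '0', '1', '4', '-', '0', '9'] : List Char) ≤ ym := le_trans (by decide) (not_lt.mp hp5)
                have hle3 : (['2', '0', '1', '5', '-', '0', '6'] : List Char) ≤ ym := le_trans (by decide) (not_lt.mp hp5)
                have hle4 : (['2', '0', '1', '7', '-', '0', '6'] : List Char) ≤ ym := le_trans (by decide) (not_lt.mp hp5)
                have hnlt4 : ¬ ym < (['2', '0', '1', '7', '-', '0', '6'] : List Char) := not_lt.mpr hle4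
                have hle5 : (['2', '0', '1', '9', '-', '0', '1'] : List Char) ≤ ym := le_trans (by decide) (not_lt.mp hp5)
                have hnlt5 : ¬ ym < (['2', '0', '1', '9', '-', '0', '1'] : List Char) := not_lt.mpr hle5
                have hlt6 : ym < (['2', '0', '2', '0', '-', '0', '9'] : List Char) := lt_of_lt_of_le hp6 (by decide)
                have hnle6 : ¬ (['2', '0', '2', '0', '-', '0', '9'] : List Char) ≤ ym := not_le.mpr hlt6
                have hlt7 : ym < (['2', '0', '2', '4', '-', '1', '1'] : List Char) := lt_of_lt_of_le hp6 (by decide)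
                have hnle7 : ¬ (['2', '0', '2', '4', '-', '1', '1'] : List Char) ≤ ym := not_le.mpr hlt7
                have hna0 : ¬ ym ≤ (['2', '0', '1', '3', '-', '0', '5'] : List Char) := not_le.mpr (lt_of_lt_of_le (by decide) (not_lt.mp hp5))
                have hna1 : ¬ ym ≤ (['2', '0', '1', '4', '-', '0', '8'] : List Char) := not_le.mpr (lt_of_lt_of_le (by decide) (not_lt.mp hp5))
                have hna2 : ¬ ym ≤ (['2', '0', '1', '5', '-', '0', '5'] : List Char) := not_le.mpr (lt_of_lt_of_le (by decide) (not_lt.mp hp5))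
                have hna3 : ¬ ym ≤ (['2', '0', '1', '7', '-', '0', '5'] : List Char) := not_le.mpr (lt_of_lt_of_le (by decide) (not_lt.mp hp5))
                have hna4 : ¬ ym ≤ (['2', '0', '1', '8', '-', '1', '2'] : List Char) := not_le.mpr (lt_of_lt_of_le (by decide) (not_lt.mp hp5))
                simp [eraScan, altCore, pvERAS, pvNAMES, pvLOS, pvHIS, PySem.List.bisectRight, PySem.List.bisectRightLoop, hle0, hle1, hle2, hle3, hle4, hnlt4, hle5, hnlt5, hlt6, hnle6, hnle7, hna0, hna1, hna2, hna3, hna4]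
              · 
                by_cases hp7 : ym < (['2', '0', '2', '4', '-', '1', '1'] : List Char)
                · 
                  have hle0 : (['0', '0', '0', '0', '-', '0', '0'] : List Char) ≤ ym := le_trans (by decide) (not_lt.mp hp6)
                  have hle1 : (['2', '0', '1', '3', '-', '0', '6'] : List Char) ≤ ym := le_trans (by decide) (not_lt.mp hp6)
                  have hle2 : (['2', '0', '1', '4', '-', '0', '9'] : List Char) ≤ ym := le_trans (by decide) (not_lt.mp hp6)
                  have hle3 : (['2', '0', '1', '5', '-', '0', '6'] : List Char) ≤ ym := le_trans (by decide) (not_lt.mp hp6)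
                  have hle4 : (['2', '0', '1', '7', '-', '0', '6'] : List Char) ≤ ym := le_trans (by decide) (not_lt.mp hp6)
                  have hnlt4 : ¬ ym < (['2', '0', '1', '7', '-', '0', '6'] : List Char) := not_lt.mpr hle4
                  have hle5 : (['2', '0', '1', '9', '-', '0', '1'] : List Char) ≤ ym := le_trans (by decide) (not_lt.mp hp6)
                  have hle6 : (['2', '0', '2', '0', '-', '0', '9'] : List Char) ≤ ym := le_trans (by decide) (not_lt.mp hp6)
                  have hnlt6 : ¬ ym < (['2', '0', '2', '0', '-', '0', '9'] : List Char) := not_lt.mpr hle6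
                  have hlt7 : ym < (['2', '0', '2', '4', '-', '1', '1'] : List Char) := lt_of_lt_of_le hp7 (by decide)
                  have hnle7 : ¬ (['2', '0', '2', '4', '-', '1', '1'] : List Char) ≤ ym := not_le.mpr hlt7
                  have hna0 : ¬ ym ≤ (['2', '0', '1', '3', '-', '0', '5'] : List Char) := not_le.mpr (lt_of_lt_of_le (by decide) (not_lt.mp hp6))
                  have hna1 : ¬ ym ≤ (['2', '0', '1', '4', '-', '0', '8'] : List Char) := not_le.mpr (lt_of_lt_of_le (by decide) (not_lt.mp hp6))
                  have hna2 : ¬ ym ≤ (['2', '0', '1', '5', '-', '0', '5'] : List Char) := not_le.mpr (lt_of_lt_of_le (by decide) (not_lt.mp hp6))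
                  have hna3 : ¬ ym ≤ (['2', '0', '1', '7', '-', '0', '5'] : List Char) := not_le.mpr (lt_of_lt_of_le (by decide) (not_lt.mp hp6))
                  have hna4 : ¬ ym ≤ (['2', '0', '1', '8', '-', '1', '2'] : List Char) := not_le.mpr (lt_of_lt_of_le (by decide) (not_lt.mp hp6))
                  have hna5 : ¬ ym ≤ (['2', '0', '2', '0', '-', '0', '8'] : List Char) := not_le.mpr (lt_of_lt_of_le (by decide) (not_lt.mp hp6))
                  simp [eraScan, altCore, pvERAS, pvNAMES, pvLOS, pvHIS, PySem.List.bisectRight, PySem.List.bisectRightLoop, hle0, hle1, hle2, hle3, hle4, hnlt4, hle5, hle6, hnlt6, hlt7, hnle7, hna0, hna1, hna2, hna3, hna4, hna5]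
                · 
                  have hle0 : (['0', '0', '0', '0', '-', '0', '0'] : List Char) ≤ ym := le_trans (by decide) (not_lt.mp hp7)
                  have hle1 : (['2', '0', '1', '3', '-', '0', '6'] : List Char) ≤ ym := le_trans (by decide) (not_lt.mp hp7)
                  have hle2 : (['2', '0', '1', '4', '-', '0', '9'] : List Char) ≤ ym := le_trans (by decide) (not_lt.mp hp7)
                  have hle3 : (['2', '0', '1', '5', '-', '0', '6'] : List Char) ≤ ym := le_trans (by decide) (not_lt.mp hp7)
                  have hle4 : (['2', '0', '1', '7', '-', '0', '6'] : List Char) ≤ ym := le_trans (by decide) (not_lt.mp hp7)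
                  have hnlt4 : ¬ ym < (['2', '0', '1', '7', '-', '0', '6'] : List Char) := not_lt.mpr hle4
                  have hle5 : (['2', '0', '1', '9', '-', '0', '1'] : List Char) ≤ ym := le_trans (by decide) (not_lt.mp hp7)
                  have hle6 : (['2', '0', '2', '0', '-', '0', '9'] : List Char) ≤ ym := le_trans (by decide) (not_lt.mp hp7)
                  have hnlt6 : ¬ ym < (['2', '0', '2', '0', '-', '0', '9'] : List Char) := not_lt.mpr hle6
                  have hle7 : (['2', '0', '2', '4', '-', '1', '1'] : List Char) ≤ ym := le_trans (by decide) (not_lt.mp hp7)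
                  have hnlt7 : ¬ ym < (['2', '0', '2', '4', '-', '1', '1'] : List Char) := not_lt.mpr hle7
                  have hna0 : ¬ ym ≤ (['2', '0', '1', '3', '-', '0', '5'] : List Char) := not_le.mpr (lt_of_lt_of_le (by decide) (not_lt.mp hp7))
                  have hna1 : ¬ ym ≤ (['2', '0', '1', '4', '-', '0', '8'] : List Char) := not_le.mpr (lt_of_lt_of_le (by decide) (not_lt.mp hp7))
                  have hna2 : ¬ ym ≤ (['2', '0', '1', '5', '-', '0', '5'] : List Char) := not_le.mpr (lt_of_lt_of_le (by decide) (not_lt.mp hp7))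
                  have hna3 : ¬ ym ≤ (['2', '0', '1', '7', '-', '0', '5'] : List Char) := not_le.mpr (lt_of_lt_of_le (by decide) (not_lt.mp hp7))
                  have hna4 : ¬ ym ≤ (['2', '0', '1', '8', '-', '1', '2'] : List Char) := not_le.mpr (lt_of_lt_of_le (by decide) (not_lt.mp hp7))
                  have hna5 : ¬ ym ≤ (['2', '0', '2', '0', '-', '0', '8'] : List Char) := not_le.mpr (lt_of_lt_of_le (by decide) (not_lt.mp hp7))
                  have hna6 : ¬ ym ≤ (['2', '0', '2', '4', '-', '1', '0'] : List Char) := not_le.mpr (lt_of_lt_of_le (by decide) (not_lt.mp hp7))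
                  simp [eraScan, altCore, pvERAS, pvNAMES, pvLOS, pvHIS, PySem.List.bisectRight, PySem.List.bisectRightLoop, hle0, hle1, hle2, hle3, hle4, hnlt4, hle5, hle6, hnlt6, hle7, hnlt7, hna0, hna1, hna2, hna3, hna4, hna5, hna6]

-- ===== VERDICT (by name: the statement is the Claim_ definition above) =====
theorem era_of_spec : Claim_equal_era_of := by
  intro date _
  unfold Spec_era_of
  match date with
  | none => rfl
  | some s =>
    simp only [era_of, era_of_alt]
    by_cases h : s.toList.length < 7
    · rw [if_pos h, if_pos (Or.inr h)]
    · have h0 : ¬ (s.toList = [] ∨ s.toList.length < 7) := by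
        rintro (he | hl)
        · exact h (by simp [he])
        · exact h hl
      rw [if_neg h0, if_neg h]
      exact eraCore_eq (s.toList.take 7)
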